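-- pv_equiv track=rewrite | github.com/CoconutJJ/scripts | leetcode/kosarajus.py | dfs
-- ===== SOURCE A (Python) =====
-- def dfs(root: str, adj: dict[str, list[str]], visited: set):
--     visit_stack = []
--     tr = dict()
--
--     def rec(start: str):
--         visited.add(start)
--
--         for n in adj[start]:
--
--             # compute the transpose graph while doing DFS
--             if n not in tr:
--                 tr[n] = []
--
--             tr[n].append(start)
--
--             if n in visited:
--                 continue
--
--             visited.add(n)
--             rec(n)
--
--         # push each node to stack after all it's neighbours have been visited
--         # we use a stack because we would like to find a SCC sink node (i.e a
--         # node within a SCC that can only reach nodes within that SCC)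
--         visit_stack.append(start)
--
--     rec(root)
--
--     return visit_stack, tr
-- ===== SOURCE B (Python) =====
-- def dfs(root: str, adj: dict[str, list[str]], visited: set):
--     # Iterative DFS with an explicit stack of (node, remaining-neighbours) frames
--     # instead of nested recursion; builds the same finish stack and transpose.
--     visit_stack = []
--     tr = dict()
--
--     visited.add(root)
--     frames = [[root, list(adj[root])]]
--
--     while frames:
--         node, rem = frames[-1]
--         if not rem:
--             visit_stack.append(node)
--             frames.pop()
--             continue
--         n = rem.pop(0)
--         tr.setdefault(n, []).append(node)
--         if n not in visited:
--             visited.add(n)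
--             frames.append([n, list(adj[n])])
--
--     return visit_stack, tr
-- ===== Notes on version B (the rewrite author's own statement) =====
-- stated objective: alternative
-- what changed: A's nested recursive DFS helper is replaced by an iterative loop over an explicit stack of (node, remaining-neighbours) frames that reproduces the same edge-discovery order, transpose dict and post-order finish stack.
-- outside the precondition, e.g. on dfs('a', {'a': [], 'z': ['q']}, set()): A returns (['a'], {}), B returns (['a'], {})
import Mathlib
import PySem

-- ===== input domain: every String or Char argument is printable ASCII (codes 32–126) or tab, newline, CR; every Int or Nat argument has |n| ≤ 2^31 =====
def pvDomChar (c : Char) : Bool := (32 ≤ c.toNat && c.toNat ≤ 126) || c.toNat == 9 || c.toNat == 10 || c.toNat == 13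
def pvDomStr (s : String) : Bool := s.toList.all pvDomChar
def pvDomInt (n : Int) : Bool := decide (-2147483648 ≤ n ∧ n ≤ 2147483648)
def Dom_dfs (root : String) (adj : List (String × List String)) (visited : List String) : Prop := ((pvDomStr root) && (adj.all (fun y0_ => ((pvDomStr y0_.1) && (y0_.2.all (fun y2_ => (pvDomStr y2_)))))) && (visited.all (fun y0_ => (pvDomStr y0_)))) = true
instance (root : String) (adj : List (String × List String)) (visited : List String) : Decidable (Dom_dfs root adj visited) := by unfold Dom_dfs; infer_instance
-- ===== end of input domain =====

-- B replaces A's nested recursion by an iterative DFS over an explicit stack of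
-- (node, remaining-neighbours) frames (objective: alternative decomposition, same cost).
-- Both Pythons mutate the `visited` argument in place identically; the theorems below
-- are about the RETURN value (visit_stack, tr).

-- ===== PORT A =====
-- A's rec: fuel counts recursion depth only; pvFuelA fuel is proved sufficient on Pre_.
mutual
def pvRecA (d : PySem.Dict String (List String)) : Nat → String →
    PySem.Set String → List String → PySem.Dict String (List String) →
    Option (PySem.Set String × List String × PySem.Dict String (List String))
  | 0, _, _, _, _ => none
  | f+1, start, v, s, t =>
    let v1 := PySem.Set.add v start                    -- visited.add(start)
    match PySem.Dict.get? d start with                 -- adj[start]  (none = KeyError)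
    | none => none
    | some ns =>
      match pvLoopA d f ns start v1 s t with
      | none => none
      | some (v2, s2, t2) => some (v2, s2 ++ [start], t2)   -- visit_stack.append(start)
  termination_by f _ _ _ _ => (f, 0)

def pvLoopA (d : PySem.Dict String (List String)) : Nat → List String → String →
    PySem.Set String → List String → PySem.Dict String (List String) →
    Option (PySem.Set String × List String × PySem.Dict String (List String))
  | _, [], _, v, s, t => some (v, s, t)
  | f, n :: rest, start, v, s, t =>
    let t1 := if PySem.Dict.contains t n then t else PySem.Dict.insert t n []   -- if n not in tr: tr[n] = []
    let t2 := PySem.Dict.insert t1 n (PySem.Dict.getD t1 n [] ++ [start])       -- tr[n].append(start)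
    if PySem.Set.contains v n then
      pvLoopA d f rest start v s t2                                             -- continue
    else
      match pvRecA d f n (PySem.Set.add v n) s t2 with                          -- visited.add(n); rec(n)
      | none => none
      | some (v', s', t') => pvLoopA d f rest start v' s' t'
  termination_by f ns _ _ _ _ => (f, ns.length + 1)
end

def pvFuelA (adj : List (String × List String)) : Nat :=
  ((PySem.Dict.ofList adj).items.flatMap (fun p => p.2)).length + 2

def dfs (root : String) (adj : List (String × List String)) (visited : List String) : List String × (List (String × List String)) :=
  match pvRecA (PySem.Dict.ofList adj) (pvFuelA adj) root (PySem.Set.ofList visited) [] PySem.Dict.empty with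
  | none => ([], [])                                   -- KeyError (excluded by Pre_)
  | some (_, s, t) => (s, t.items)

-- ===== PORT B =====
-- universe of nodes that can still be discovered (for pvRunB's termination measure)
def pvNbrs (d : PySem.Dict String (List String)) : List String :=
  d.items.flatMap (fun p => p.2)

def pvCnt (U : List String) (v : PySem.Set String) : Nat :=
  (U.filter (fun x => !(PySem.Set.contains v x))).toFinset.card

def pvMu (d : PySem.Dict String (List String)) (frames : List (String × List String)) (v : PySem.Set String) : Nat :=
  pvCnt (frames.flatMap (fun p => p.2) ++ pvNbrs d) v

def pvSz (frames : List (String × List String)) : Nat :=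
  (frames.map (fun p => p.2.length + 1)).sum

lemma pvCnt_lt {U' U : List String} {v v' : PySem.Set String} {n : String}
    (hU : ∀ x, x ∈ U' → x ∈ U) (hv : ∀ x, x ∈ v → x ∈ v')
    (hn : n ∈ U) (hnv : n ∉ v) (hnv' : n ∈ v') : pvCnt U' v' < pvCnt U v := by
  apply Finset.card_lt_card
  constructor
  · intro x hx
    simp only [List.mem_toFinset, List.mem_filter, Bool.not_eq_true',
      ← Bool.not_eq_true, PySem.Set.contains_iff] at hx ⊢
    exact ⟨hU x hx.1, fun hxv => hx.2 (hv x hxv)⟩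
  · intro hsup
    have : n ∈ (U'.filter (fun x => !(PySem.Set.contains v' x))).toFinset := by
      apply hsup
      simp only [List.mem_toFinset, List.mem_filter, Bool.not_eq_true',
        ← Bool.not_eq_true, PySem.Set.contains_iff]
      exact ⟨hn, hnv⟩
    simp only [List.mem_toFinset, List.mem_filter, Bool.not_eq_true',
      ← Bool.not_eq_true, PySem.Set.contains_iff] at this
    exact this.2 hnv'

lemma pvMu_push_lt (d : PySem.Dict String (List String)) (node n : String)
    (rem l : List String) (rest : List (String × List String)) (v : PySem.Set String)
    (hl : PySem.Dict.get? d n = some l) (hnv : n ∉ v) :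
    pvMu d ((n, l) :: (node, rem) :: rest) (PySem.Set.add v n) < pvMu d ((node, n :: rem) :: rest) v := by
  apply pvCnt_lt (n := n)
  · intro x hx
    have hlsub : x ∈ l → x ∈ pvNbrs d := fun h =>
      List.mem_flatMap.mpr ⟨(n, l), PySem.Dict.mem_items_of_get?_eq_some d hl, h⟩
    simp only [List.flatMap_cons, List.mem_append, List.mem_cons] at hx ⊢
    tauto
  · intro x hx; exact (PySem.Set.mem_add v n x).mpr (Or.inl hx)
  · simp
  · exact hnv
  · exact (PySem.Set.mem_add v n n).mpr (Or.inr rfl)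

def pvRunB (d : PySem.Dict String (List String)) :
    List (String × List String) → PySem.Set String → List String → PySem.Dict String (List String) →
    Option (PySem.Set String × List String × PySem.Dict String (List String))
  | [], v, s, t => some (v, s, t)
  | (node, []) :: rest, v, s, t => pvRunB d rest v (s ++ [node]) t   -- visit_stack.append(node); frames.pop()
  | (node, n :: rem) :: rest, v, s, t =>
    let t' := PySem.Dict.modify t n [] (fun l => l ++ [node])        -- tr.setdefault(n, []).append(node)
    if hv : PySem.Set.contains v n then
      pvRunB d ((node, rem) :: rest) v s t'
    else
      match hl : PySem.Dict.get? d n with                            -- adj[n]  (none = KeyError)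
      | none => none
      | some l => pvRunB d ((n, l) :: (node, rem) :: rest) (PySem.Set.add v n) s t'
termination_by frames v _ _ => (pvMu d frames v, pvSz frames)
decreasing_by
  · apply Prod.Lex.right
    simp [pvSz]
  · have h1 : pvMu d ((node, rem) :: rest) v = pvMu d ((node, n :: rem) :: rest) v := by
      simp only [pvMu, pvCnt, List.flatMap_cons, List.cons_append]
      rw [List.filter_cons_of_neg (by simp [(PySem.Set.contains_iff v n).mp hv])]
    rw [h1]
    apply Prod.Lex.right
    simp [pvSz]
  · apply Prod.Lex.left
    exact pvMu_push_lt d node n rem l rest v hl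
      (fun hm => hv ((PySem.Set.contains_iff v n).mpr hm))

def dfs_alt (root : String) (adj : List (String × List String)) (visited : List String) : List String × (List (String × List String)) :=
  -- visited.add(root); frames = [[root, adj[root]]]  (adj[root] missing = KeyError, excluded by Pre_)
  match PySem.Dict.get? (PySem.Dict.ofList adj) root with
  | none => ([], [])
  | some l =>
    match pvRunB (PySem.Dict.ofList adj) [(root, l)]
        (PySem.Set.add (PySem.Set.ofList visited) root) [] PySem.Dict.empty with
    | none => ([], [])                                               -- KeyError (excluded by Pre_)
    | some (_, s, t) => (s, t.items)

-- ===== PRECONDITION & SPEC =====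
-- Pre_ excludes inputs on which A raises KeyError because a traversed node is missing from
-- adj; the closed form requires every listed neighbour to be a key of adj or initially
-- visited, which also excludes some inputs A returns on (a missing neighbour that the
-- traversal never reaches, e.g. hanging off an unreachable key) — reachability itself is
-- not a closed-form condition.
def Pre_dfs (root : String) (adj : List (String × List String)) (visited : List String) : Prop :=
  ((PySem.Dict.ofList adj).get? root).isSome = true ∧
  ∀ p ∈ adj, ∀ n ∈ p.2, ((PySem.Dict.ofList adj).get? n).isSome = true ∨ n ∈ visited
instance (root : String) (adj : List (String × List String)) (visited : List String) : Decidable (Pre_dfs root adj visited) := by unfold Pre_dfs; infer_instance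

def pvWitness_dfs : String × (List (String × List String)) × List String :=
  ("a", [("a", ["b", "c"]), ("b", ["a"]), ("c", [])], ["d"])

def Spec_dfs (root : String) (adj : List (String × List String)) (visited : List String) (out : List String × (List (String × List String))) : Prop := out = dfs_alt root adj visited
instance (root : String) (adj : List (String × List String)) (visited : List String) (out : List String × (List (String × List String))) : Decidable (Spec_dfs root adj visited out) := by unfold Spec_dfs; infer_instance

-- ===== CLAIM (what is proved, stated in full; the proofs are below) =====
def Claim_equal_dfs : Prop := ∀ (root : String) (adj : List (String × List String)) (visited : List String), Dom_dfs root adj visited → Pre_dfs root adj visited → Spec_dfs root adj visited (dfs root adj visited)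

-- ===== LEMMAS AND PROOFS =====

-- step lemmas for pvRunB
lemma pvRunB_nil (d : PySem.Dict String (List String)) (v : PySem.Set String) (s : List String) (t : PySem.Dict String (List String)) :
    pvRunB d [] v s t = some (v, s, t) := by rw [pvRunB]

lemma pvRunB_pop (d : PySem.Dict String (List String)) (node : String) (rest : List (String × List String)) (v : PySem.Set String) (s : List String) (t : PySem.Dict String (List String)) :
    pvRunB d ((node, []) :: rest) v s t = pvRunB d rest v (s ++ [node]) t := by rw [pvRunB]

lemma pvRunB_vis (d : PySem.Dict String (List String)) (node n : String) (rem : List String) (rest : List (String × List String)) (v : PySem.Set String) (s : List String) (t : PySem.Dict String (List String))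
    (h : PySem.Set.contains v n = true) :
    pvRunB d ((node, n :: rem) :: rest) v s t
      = pvRunB d ((node, rem) :: rest) v s (PySem.Dict.modify t n [] (fun l => l ++ [node])) := by
  rw [pvRunB]; simp [(PySem.Set.contains_iff v n).mp h]

lemma pvRunB_push (d : PySem.Dict String (List String)) (node n : String) (rem l : List String) (rest : List (String × List String)) (v : PySem.Set String) (s : List String) (t : PySem.Dict String (List String))
    (h : PySem.Set.contains v n = false) (hl : PySem.Dict.get? d n = some l) :
    pvRunB d ((node, n :: rem) :: rest) v s t
      = pvRunB d ((n, l) :: (node, rem) :: rest) (PySem.Set.add v n) s (PySem.Dict.modify t n [] (fun l => l ++ [node])) := by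
  have hm : n ∉ v := fun hmem => by rw [(PySem.Set.contains_iff v n).mpr hmem] at h; cases h
  rw [pvRunB]; simp [hm]
  split <;> simp_all

-- A's two-step transpose update is Dict.modify
lemma pvDictStep (t : PySem.Dict String (List String)) (n x : String) :
    (if PySem.Dict.contains t n then t else PySem.Dict.insert t n []).insert n
        ((if PySem.Dict.contains t n then t else PySem.Dict.insert t n []).getD n [] ++ [x])
      = PySem.Dict.modify t n [] (fun l => l ++ [x]) := by
  by_cases h : PySem.Dict.contains t n = true
  · simp [h, PySem.Dict.modify]
  · simp only [Bool.not_eq_true] at h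
    simp only [h, Bool.false_eq_true, if_false, PySem.Dict.modify,
      PySem.Dict.getD_insert_self, PySem.Dict.insert_insert_self,
      PySem.Dict.getD_of_not_contains t ([] : List String) h]

-- step lemmas for pvRecA / pvLoopA
lemma pvRecA_succ (d : PySem.Dict String (List String)) (f : Nat) (start : String) (v : PySem.Set String) (s : List String) (t : PySem.Dict String (List String))
    (ns : List String) (hl : PySem.Dict.get? d start = some ns) :
    pvRecA d (f + 1) start v s t
      = match pvLoopA d f ns start (PySem.Set.add v start) s t with
        | none => none
        | some (v2, s2, t2) => some (v2, s2 ++ [start], t2) := by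
  rw [pvRecA]; simp [hl]

lemma pvLoopA_nil (d : PySem.Dict String (List String)) (f : Nat) (start : String) (v : PySem.Set String) (s : List String) (t : PySem.Dict String (List String)) :
    pvLoopA d f [] start v s t = some (v, s, t) := by rw [pvLoopA]

lemma pvLoopA_cons_vis (d : PySem.Dict String (List String)) (f : Nat) (n start : String) (rem : List String) (v : PySem.Set String) (s : List String) (t : PySem.Dict String (List String))
    (h : PySem.Set.contains v n = true) :
    pvLoopA d f (n :: rem) start v s t
      = pvLoopA d f rem start v s (PySem.Dict.modify t n [] (fun l => l ++ [start])) := by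
  rw [pvLoopA]; rw [pvDictStep]; simp [(PySem.Set.contains_iff v n).mp h]

lemma pvLoopA_cons_new (d : PySem.Dict String (List String)) (f : Nat) (n start : String) (rem : List String) (v : PySem.Set String) (s : List String) (t : PySem.Dict String (List String))
    (h : PySem.Set.contains v n = false) :
    pvLoopA d f (n :: rem) start v s t
      = match pvRecA d f n (PySem.Set.add v n) s (PySem.Dict.modify t n [] (fun l => l ++ [start])) with
        | none => none
        | some (v', s', t') => pvLoopA d f rem start v' s' t' := by
  have hm : n ∉ v := fun hmem => by rw [(PySem.Set.contains_iff v n).mpr hmem] at h; cases h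
  rw [pvLoopA]; rw [pvDictStep]; simp [hm]

-- all neighbours listed in d
lemma pvSubNbrs (d : PySem.Dict String (List String)) (k : String) (ns : List String)
    (hl : PySem.Dict.get? d k = some ns) : ∀ n ∈ ns, n ∈ pvNbrs d := fun n hn =>
  List.mem_flatMap.mpr ⟨(k, ns), PySem.Dict.mem_items_of_get?_eq_some d hl, hn⟩

lemma pvCnt_mono {U' U : List String} {v v' : PySem.Set String}
    (hU : ∀ x ∈ U', x ∈ U) (hv : ∀ x ∈ v, x ∈ v') : pvCnt U' v' ≤ pvCnt U v := by
  apply Finset.card_le_card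
  intro x hx
  simp only [List.mem_toFinset, List.mem_filter, Bool.not_eq_true',
    ← Bool.not_eq_true, PySem.Set.contains_iff] at hx ⊢
  exact ⟨hU x hx.1, fun hxv => hx.2 (hv x hxv)⟩

def pvMuA (d : PySem.Dict String (List String)) (v : PySem.Set String) : Nat :=
  pvCnt (pvNbrs d) v

lemma pvMuA_add_lt (d : PySem.Dict String (List String)) (v : PySem.Set String) (n : String)
    (hn : n ∈ pvNbrs d) (hnv : n ∉ v) : pvMuA d (PySem.Set.add v n) < pvMuA d v :=
  pvCnt_lt (fun _ h => h) (fun x hx => (PySem.Set.mem_add v n x).mpr (Or.inl hx)) hn hnv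
    ((PySem.Set.mem_add v n n).mpr (Or.inr rfl))

lemma pvMuA_le_len (d : PySem.Dict String (List String)) (v : PySem.Set String) :
    pvMuA d v ≤ (pvNbrs d).length :=
  le_trans (List.toFinset_card_le _) (List.length_filter_le _ _)

-- A's ok-invariant: every unvisited neighbour is a key of d
def pvOK (d : PySem.Dict String (List String)) (v : PySem.Set String) : Prop :=
  ∀ p ∈ d.items, ∀ n ∈ p.2, n ∈ v ∨ ((PySem.Dict.get? d n).isSome = true)

lemma pvOK_mono (d : PySem.Dict String (List String)) {v w : PySem.Set String}
    (h : pvOK d v) (hvw : ∀ x ∈ v, x ∈ w) : pvOK d w := by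
  intro p hp n hn
  rcases h p hp n hn with h1 | h1
  · exact Or.inl (hvw n h1)
  · exact Or.inr h1

-- the recursion statement at fuel f: A's rec succeeds and B's machine simulates it
def pvRS (d : PySem.Dict String (List String)) (f : Nat) : Prop :=
  ∀ start v s t ns, pvOK d v → PySem.Dict.get? d start = some ns →
    pvMuA d (PySem.Set.add v start) < f →
    ∃ v' s' t', pvRecA d f start v s t = some (v', s', t') ∧ (∀ x ∈ v, x ∈ v') ∧
      ∀ rest, pvRunB d ((start, ns) :: rest) (PySem.Set.add v start) s t = pvRunB d rest v' s' t'

lemma pv_loop (d : PySem.Dict String (List String)) (f : Nat) (hRS : pvRS d f) :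
    ∀ ns start v s t, pvOK d v → (∀ n ∈ ns, n ∈ pvNbrs d) → pvMuA d v ≤ f →
    ∃ v' s' t', pvLoopA d f ns start v s t = some (v', s', t') ∧ (∀ x ∈ v, x ∈ v') ∧
      ∀ rest, pvRunB d ((start, ns) :: rest) v s t = pvRunB d ((start, []) :: rest) v' s' t' := by
  intro ns
  induction ns with
  | nil =>
    intro start v s t _ _ _
    exact ⟨v, s, t, pvLoopA_nil d f start v s t, fun x hx => hx, fun rest => rfl⟩
  | cons n rem IH =>
    intro start v s t hok hsub hfuel
    by_cases hv : PySem.Set.contains v n = true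
    · obtain ⟨v', s', t', hA, hmono, hB⟩ :=
        IH start v s (PySem.Dict.modify t n [] (fun l => l ++ [start])) hok
          (fun m hm => hsub m (List.mem_cons_of_mem n hm)) hfuel
      refine ⟨v', s', t', ?_, hmono, ?_⟩
      · rw [pvLoopA_cons_vis d f n start rem v s t hv]; exact hA
      · intro rest
        rw [pvRunB_vis d start n rem rest v s t hv]
        exact hB rest
    · have hv' : PySem.Set.contains v n = false := by
        simpa using hv
      have hnv : n ∉ v := fun hm => hv ((PySem.Set.contains_iff v n).mpr hm)
      have hnnb : n ∈ pvNbrs d := hsub n (List.mem_cons_self)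
      -- n is a key of d
      obtain ⟨p, hp, hnp⟩ := List.mem_flatMap.mp hnnb
      have hkey : ((PySem.Dict.get? d n).isSome = true) := by
        rcases hok p hp n hnp with h1 | h1
        · exact absurd h1 hnv
        · exact h1
      obtain ⟨lns, hlns⟩ := Option.isSome_iff_exists.mp hkey
      have haddmem : n ∈ PySem.Set.add v n := (PySem.Set.mem_add v n n).mpr (Or.inr rfl)
      have haddidem : PySem.Set.add (PySem.Set.add v n) n = PySem.Set.add v n :=
        PySem.Set.add_of_mem haddmem
      have hfuel1 : pvMuA d (PySem.Set.add v n) < f :=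
        lt_of_lt_of_le (pvMuA_add_lt d v n hnnb hnv) hfuel
      obtain ⟨v2, s2, t2, hrec, hmono2, hrunrec⟩ :=
        hRS n (PySem.Set.add v n) s (PySem.Dict.modify t n [] (fun l => l ++ [start])) lns
          (pvOK_mono d hok (fun x hx => (PySem.Set.mem_add v n x).mpr (Or.inl hx)))
          hlns (by rw [haddidem]; exact hfuel1)
      have hsubadd : ∀ x ∈ v, x ∈ v2 := fun x hx =>
        hmono2 x ((PySem.Set.mem_add v n x).mpr (Or.inl hx))
      obtain ⟨v3, s3, t3, hA3, hmono3, hB3⟩ :=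
        IH start v2 s2 t2 (pvOK_mono d hok hsubadd)
          (fun m hm => hsub m (List.mem_cons_of_mem n hm))
          (by
            unfold pvMuA at hfuel1 ⊢
            exact le_trans (pvCnt_mono (fun _ h => h) hmono2) (le_of_lt hfuel1))
      refine ⟨v3, s3, t3, ?_, fun x hx => hmono3 x (hsubadd x hx), ?_⟩
      · rw [pvLoopA_cons_new d f n start rem v s t hv']
        rw [hrec]
        exact hA3
      · intro rest
        rw [pvRunB_push d start n rem lns rest v s t hv' hlns]
        have := hrunrec ((start, rem) :: rest)
        rw [haddidem] at this
        rw [this]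
        exact hB3 rest

lemma pv_rec (d : PySem.Dict String (List String)) : ∀ f, pvRS d f := by
  intro f
  induction f with
  | zero =>
    intro start v s t ns _ _ hfuel
    exact absurd hfuel (Nat.not_lt_zero _)
  | succ f IH =>
    intro start v s t ns hok hns hfuel
    obtain ⟨v2, s2, t2, hloop, hmono, hrun⟩ :=
      pv_loop d f IH ns start (PySem.Set.add v start) s t
        (pvOK_mono d hok (fun x hx => (PySem.Set.mem_add v start x).mpr (Or.inl hx)))
        (pvSubNbrs d start ns hns)
        (Nat.lt_succ_iff.mp hfuel)
    refine ⟨v2, s2 ++ [start], t2, ?_, ?_, ?_⟩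
    · rw [pvRecA_succ d f start v s t ns hns, hloop]
    · exact fun x hx => hmono x ((PySem.Set.mem_add v start x).mpr (Or.inl hx))
    · intro rest
      rw [hrun rest, pvRunB_pop]

lemma pvItems_foldl (l : List (String × List String)) :
    ∀ (d0 : PySem.Dict String (List String)) (p : String × List String),
      p ∈ (l.foldl (fun acc q => acc.insert q.1 q.2) d0).items → p ∈ d0.items ∨ p ∈ l := by
  induction l with
  | nil => intro d0 p hp; exact Or.inl hp
  | cons a l IH =>
    intro d0 p hp
    rcases IH (d0.insert a.1 a.2) p hp with h1 | h1
    · rcases (PySem.Dict.mem_items_insert d0 a.1 a.2 p).mp h1 with h2 | h2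
      · right; rw [h2]; exact List.mem_cons_self
      · exact Or.inl h2.1
    · right; exact List.mem_cons_of_mem a h1

lemma pvItems_ofList (adj : List (String × List String)) (p : String × List String)
    (hp : p ∈ (PySem.Dict.ofList adj).items) : p ∈ adj := by
  rcases pvItems_foldl adj PySem.Dict.empty p hp with h | h
  · simp [PySem.Dict.empty] at h
  · exact h

-- ===== VERDICT (by name: the statement is the Claim_ definition above) =====
theorem dfs_spec : Claim_equal_dfs := by
  intro root adj visited _ hpre
  unfold Spec_dfs
  obtain ⟨hroot, hok0⟩ := hpre
  obtain ⟨ns, hns⟩ := Option.isSome_iff_exists.mp hroot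
  have hok : pvOK (PySem.Dict.ofList adj) (PySem.Set.ofList visited) := by
    intro p hp n hn
    rcases hok0 p (pvItems_ofList adj p hp) n hn with h1 | h1
    · exact Or.inr h1
    · exact Or.inl ((PySem.Set.mem_ofList visited n).mpr h1)
  have hfuel : pvMuA (PySem.Dict.ofList adj)
      (PySem.Set.add (PySem.Set.ofList visited) root) < pvFuelA adj := by
    have := pvMuA_le_len (PySem.Dict.ofList adj)
      (PySem.Set.add (PySem.Set.ofList visited) root)
    unfold pvFuelA
    have hlen : (pvNbrs (PySem.Dict.ofList adj)).length
        = ((PySem.Dict.ofList adj).items.flatMap (fun p => p.2)).length := rfl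
    omega
  obtain ⟨v', s', t', hA, _, hrun⟩ :=
    pv_rec (PySem.Dict.ofList adj) (pvFuelA adj) root (PySem.Set.ofList visited) []
      PySem.Dict.empty ns hok hns hfuel
  have hB : pvRunB (PySem.Dict.ofList adj) [(root, ns)]
      (PySem.Set.add (PySem.Set.ofList visited) root) [] PySem.Dict.empty
        = some (v', s', t') := by
    rw [hrun [], pvRunB_nil]
  unfold dfs dfs_alt
  rw [hA, hns]
  simp only [hB]
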